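-- pv_equiv track=rewrite | github.com/SuperPirate-ai/TabGenerator | python_scripts/adaptive_algorhythms/fret_estimations/attempt1/datacollector.py | idxmax
-- ===== SOURCE A (Python) =====
-- def idxmax(arr):
--     _max = 0
--     idx = -1
--     for i in range(1, len(arr)):
--         if arr[i] > _max:
--             _max = arr[i]
--             idx = i
--     return idx
-- ===== SOURCE B (Python) =====
-- def idxmax(arr):
--     tail = arr[1:]
--     m = max(tail, default=0)
--     return tail.index(m) + 1 if m > 0 else -1
-- ===== Notes on version B (the rewrite author's own statement) =====
-- stated objective: idiomatic
-- what changed: Replaces A's single-pass running-max scan with running-index bookkeeping by a reduce-then-locate two-pass: take max(arr[1:], default=0), then if positive locate its first occurrence with list.index.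
import Mathlib
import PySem

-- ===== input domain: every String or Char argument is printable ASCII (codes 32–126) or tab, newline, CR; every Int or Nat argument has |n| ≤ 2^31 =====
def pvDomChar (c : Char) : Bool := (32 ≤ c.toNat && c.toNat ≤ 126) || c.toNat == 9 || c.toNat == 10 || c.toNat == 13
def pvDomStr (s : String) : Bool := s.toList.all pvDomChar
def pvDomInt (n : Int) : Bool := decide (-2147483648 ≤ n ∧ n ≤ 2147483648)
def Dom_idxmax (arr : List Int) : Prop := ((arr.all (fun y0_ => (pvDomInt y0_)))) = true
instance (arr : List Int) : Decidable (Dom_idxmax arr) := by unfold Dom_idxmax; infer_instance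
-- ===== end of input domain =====

-- B: reduce-then-locate two-pass (max of arr[1:] with default 0, then first occurrence) instead of A's running-max/index scan; same O(n) cost, no speed claim.
-- ===== PORT A =====
def idxmax (arr : List Int) : Int :=
  ((PySem.List.pyRange 1 (PySem.List.len arr) 1).foldl
      (fun st i =>
        if PySem.List.pyGetD arr i 0 > st.1 then (PySem.List.pyGetD arr i 0, i) else st)
      ((0 : Int), (-1 : Int))).2

-- ===== PORT B =====
def idxmax_alt (arr : List Int) : Int :=
  let tail := PySem.List.slice arr (some 1) none
  let m := PySem.List.maxD tail (fun y => y) 0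
  -- tail.index(m): m > 0 guarantees m ∈ tail, so Python's ValueError is unreachable; .getD 0 never fires
  if m > 0 then ((PySem.List.index? tail m).getD 0 : Int) + 1 else -1

-- ===== PRECONDITION & SPEC =====
def Spec_idxmax (arr : List Int) (out : Int) : Prop := out = idxmax_alt arr
instance (arr : List Int) (out : Int) : Decidable (Spec_idxmax arr out) := by unfold Spec_idxmax; infer_instance

-- ===== CLAIM (what is proved, stated in full; the proofs are below) =====
def Claim_equal_idxmax : Prop := ∀ (arr : List Int), Dom_idxmax arr → Spec_idxmax arr (idxmax arr)

-- ===== LEMMAS AND PROOFS =====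

-- foldl max distributes a max out of the accumulator
theorem foldl_max_acc (r : List Int) : ∀ (a b : Int),
    r.foldl max (max a b) = max a (r.foldl max b) := by
  induction r with
  | nil => intro a b; simp
  | cons z r ih =>
    intro a b
    simp only [List.foldl_cons, max_assoc]
    exact ih a (max b z)

-- the fold A performs over indices 1..|t| of x0 :: (t ++ l), characterised:
-- it returns (max of t vs 0, 1 + first index of that max in t) when the max is positive, else (0, -1)
theorem idxmax_loop (x0 : Int) : ∀ (t l : List Int),
    (PySem.List.pyRange 1 (1 + (t.length : Int)) 1).foldl
        (fun st i =>
          if PySem.List.pyGetD (x0 :: (t ++ l)) i 0 > st.1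
          then (PySem.List.pyGetD (x0 :: (t ++ l)) i 0, i) else st)
        ((0 : Int), (-1 : Int))
      = (if t.foldl max 0 > 0
         then (t.foldl max 0, ((PySem.List.index? t (t.foldl max 0)).getD 0 : Int) + 1)
         else ((0 : Int), (-1 : Int))) := by
  intro t
  induction t using List.reverseRecOn with
  | nil =>
    intro l
    rw [show (1 + ((List.nil (α := Int)).length : Int)) = 1 by simp,
        PySem.List.pyRange_one_eq_nil (by omega)]
    simp
  | append_singleton t y ih =>
    intro l
    have hlen : (1 + ((t ++ [y]).length : Int)) = (1 + (t.length : Int)) + 1 := by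
      simp; ring
    rw [hlen, PySem.List.pyRange_one_succ_right (by omega),
        List.foldl_append]
    have hassoc : (t ++ [y]) ++ l = t ++ ([y] ++ l) := by simp
    rw [hassoc, ih ([y] ++ l)]
    -- value read at index 1 + |t| is y
    have hidx : PySem.List.pyGetD (x0 :: (t ++ ([y] ++ l))) (1 + (t.length : Int)) 0 = y := by
      have hcast : (1 + (t.length : Int)) = ((t.length + 1 : Nat) : Int) := by push_cast; ring
      rw [hcast, PySem.List.pyGetD_natCast]
      have h1 : (x0 :: (t ++ ([y] ++ l))) = (x0 :: t) ++ (y :: l) := by simp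
      rw [h1]
      have hlt : t.length + 1 < ((x0 :: t) ++ (y :: l)).length := by simp
      rw [List.getD_eq_getElem _ _ hlt,
          List.getElem_append_right (by simp)]
      simp
    have hM0 : (0 : Int) ≤ t.foldl max 0 := (PySem.List.le_foldl_max t 0).1
    have hMub : ∀ z ∈ t, z ≤ t.foldl max 0 := (PySem.List.le_foldl_max t 0).2
    have hM' : (t ++ [y]).foldl max 0 = max (t.foldl max 0) y := by
      rw [List.foldl_append]; simp
    by_cases hMpos : t.foldl max 0 > 0
    · rw [if_pos hMpos]
      simp only [List.foldl_cons, List.foldl_nil, hidx]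
      by_cases hy : y > t.foldl max 0
      · -- new strict max y, first occurrence at 1 + |t|
        rw [if_pos hy]
        have hynotin : y ∉ t := fun hmem => absurd (hMub y hmem) (by omega)
        have hM'v : (t ++ [y]).foldl max 0 = y := by rw [hM']; omega
        rw [hM'v, if_pos (by omega),
            PySem.List.index?_append_singleton_self t y hynotin]
        simp
        omega
      · -- y does not beat the max; first occurrence of the max unchanged
        rw [if_neg hy]
        have hMmem : t.foldl max 0 ∈ t := by
          rcases PySem.List.foldl_max_mem t 0 with h | h
          · omega
          · exact h
        have hM'v : (t ++ [y]).foldl max 0 = t.foldl max 0 := by rw [hM']; omega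
        rw [hM'v, if_pos hMpos, PySem.List.index?_append_of_mem [y] hMmem]
    · have hMz : t.foldl max 0 = 0 := by omega
      rw [if_neg hMpos]
      simp only [List.foldl_cons, List.foldl_nil, hidx]
      by_cases hy : y > (0 : Int)
      · rw [if_pos hy]
        have hynotin : y ∉ t := fun hmem => absurd (hMub y hmem) (by omega)
        have hM'v : (t ++ [y]).foldl max 0 = y := by rw [hM', hMz]; omega
        rw [hM'v, if_pos hy, PySem.List.index?_append_singleton_self t y hynotin]
        simp
        omega
      · rw [if_neg hy]
        have hM'v : (t ++ [y]).foldl max 0 = 0 := by rw [hM', hMz]; omega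
        rw [hM'v, if_neg (by omega)]

-- ===== VERDICT (by name: the statement is the Claim_ definition above) =====
theorem idxmax_spec : Claim_equal_idxmax := by
  intro arr _
  unfold Spec_idxmax idxmax idxmax_alt
  match arr with
  | [] => decide
  | x0 :: t =>
    have hlen : PySem.List.len (x0 :: t) = 1 + (t.length : Int) := by
      simp [PySem.List.len]; ring
    have hloop := idxmax_loop x0 t []
    rw [hlen]
    simp only [List.append_nil] at hloop
    rw [hloop, PySem.List.slice_from_one]
    simp only [List.tail_cons]
    match t with
    | [] => decide
    | z :: r =>
      have hmaxD : PySem.List.maxD (z :: r) (fun y => y) 0 = r.foldl max z := by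
        simp [PySem.List.maxD, PySem.List.max?_id_cons]
      have hM : (z :: r).foldl max 0 = max 0 (r.foldl max z) := by
        simp only [List.foldl_cons]
        exact foldl_max_acc r 0 z
      rw [hmaxD, hM]
      by_cases hpos : r.foldl max z > 0
      · rw [if_pos (by omega), if_pos hpos]
        have : max 0 (r.foldl max z) = r.foldl max z := by omega
        rw [this]
      · rw [if_neg (by omega), if_neg hpos]
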